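-- pv_equiv track=rewrite | github.com/Factories-git/TESTRIS | TETRIS.py | clear_line
-- ===== SOURCE A (Python) =====
-- class Color:
--     RED = (255, 36, 36)
--     GREEN = (29, 219, 22)
--     PINK = (255, 0, 221)
--     ORANGE = (255, 94, 0)
--     SKYBLUE = (0, 216, 255)
--     YELLOW = (225, 228, 0)
--     BLUE = (3, 7, 252)
--     HINT_RED = (205, 0, 0)
--     HINT_GREEN = (0, 169, 0)
--     HINT_PINK = (205, 0, 171)
--     HINT_ORANGE = (205, 44, 0)
--     HINT_SKYBLUE = (0, 166, 205)
--     HINT_YELLOW = (175, 178, 0)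
--     HINT_BLUE = (3, 7, 202)
--
--     WHITE = (255, 255, 255)
--     BLACK = (0, 0, 0)
--     GRAY = (140, 140, 140)
--
-- def clear_line(board, set_positions):
--     count = 0  # 제거된 줄의 개수
--     idx = 0  # 마지막으로 제거된 위치 y
--     start_idx = -float('inf')  # 마지막으로 제거된 위치 y
--     deletes = list()
--     down_ = list()
--     for i in range(len(board) - 1, -1, -1):
--         line = board[i]
--         if Color.BLACK not in line:
--             count += 1
--             idx = i
--             start_idx = max(start_idx, i)
--             deletes.append(i)
--             for j in range(len(line)):
--                 try:
--                     del set_positions[j, i]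
--                 except KeyError:
--                     continue
--     if count > 0:  # 제거된 라인이 존재한다면
--         for last_idx in deletes[::-1]:
--             for x, y in sorted(set_positions, key=lambda x: -x[1]):
--                 if y < last_idx:
--                     new_pos = (x, y + 1)
--                     set_positions[new_pos] = set_positions.pop((x, y))
--     return count
-- ===== SOURCE B (Python) =====
-- # B: the return value of clear_line is just the number of board rows not containing
-- # Color.BLACK; return that count directly with a single pass. NOTE: A also mutates
-- # set_positions in place (the return value never depends on it); B leaves it untouched,
-- # so the equivalence claimed is about the return value only.
-- class Color:
--     BLACK = (0, 0, 0)
--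
-- def clear_line(board, set_positions):
--     return sum(1 for line in board if Color.BLACK not in line)
-- ===== Notes on version B (the rewrite author's own statement) =====
-- stated objective: simpler
-- what changed: B observes that the returned count never depends on set_positions or on A's delete/shift bookkeeping, and computes it as a single one-pass count of rows without BLACK (A's in-place mutation of set_positions is not reproduced; equivalence is about the return value).
import Mathlib
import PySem

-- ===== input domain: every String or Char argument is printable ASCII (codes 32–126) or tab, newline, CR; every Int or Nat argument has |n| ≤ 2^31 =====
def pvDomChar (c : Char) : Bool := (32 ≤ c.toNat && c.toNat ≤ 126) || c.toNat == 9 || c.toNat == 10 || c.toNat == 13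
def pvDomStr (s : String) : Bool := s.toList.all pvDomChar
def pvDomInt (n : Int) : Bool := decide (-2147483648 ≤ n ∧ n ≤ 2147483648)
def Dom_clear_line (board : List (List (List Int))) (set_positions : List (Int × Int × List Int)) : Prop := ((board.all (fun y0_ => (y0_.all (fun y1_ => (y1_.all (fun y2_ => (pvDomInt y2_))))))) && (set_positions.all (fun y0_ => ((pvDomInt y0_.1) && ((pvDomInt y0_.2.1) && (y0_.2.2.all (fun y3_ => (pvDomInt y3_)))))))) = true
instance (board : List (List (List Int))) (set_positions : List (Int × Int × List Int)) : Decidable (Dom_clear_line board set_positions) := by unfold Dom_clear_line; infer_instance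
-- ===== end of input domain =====

-- B simply counts the rows without Color.BLACK (the only thing A returns), dropping A's
-- delete/shift bookkeeping; A also mutates set_positions in place, B does not — the
-- equivalence proved here is about the RETURN VALUE only.

-- ===== PORT A =====
-- Color.BLACK
def pvBlack : List Int := [0, 0, 0]

-- the Python set_positions argument is a dict keyed by (x, y); rebuild it as a
-- PySem.Dict from the association list exactly as dict(pairs) would (later
-- duplicates overwrite in place)
def pvDictOf (l : List (Int × Int × List Int)) : PySem.Dict (Int × Int) (List Int) :=
  l.foldl (fun d p => d.insert (p.1, p.2.1) p.2.2) PySem.Dict.empty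

-- body of A's first loop (state: count, idx, start_idx with none = -float('inf'),
-- deletes, the dict); board[i] is always in range on the traversed indices, so
-- pyGetD's default is never read
def pvStepA (board : List (List (List Int)))
    (st : Int × Int × Option Int × List Int × PySem.Dict (Int × Int) (List Int))
    (i : Int) : Int × Int × Option Int × List Int × PySem.Dict (Int × Int) (List Int) :=
  let line := PySem.List.pyGetD board i []
  if pvBlack ∉ line then
    let count := st.1 + 1
    let idx := i
    let start_idx : Option Int := some (match st.2.2.1 with | none => i | some s => max s i)
    let deletes := st.2.2.2.1 ++ [i]
    -- `del set_positions[j, i]` with KeyError caught is exactly erase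
    let d := (PySem.List.pyRange 0 (line.length : Int) 1).foldl
      (fun d j => d.erase (j, i)) st.2.2.2.2
    (count, idx, start_idx, deletes, d)
  else st

-- A's second loop: for last_idx in deletes[::-1]: shift every position below last_idx
-- down by one (pop then reinsert; the popped key is always present — keys are
-- processed in descending y — so getD's default is never read)
def pvShiftA (deletes : List Int) (d0 : PySem.Dict (Int × Int) (List Int)) :
    PySem.Dict (Int × Int) (List Int) :=
  ((PySem.List.slice? deletes none none (-1)).getD []).foldl
    (fun d last_idx =>
      (PySem.List.sorted d.keys (fun k => -k.2) false).foldl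
        (fun d xy =>
          if xy.2 < last_idx then
            let v := (d.get? xy).getD []
            (d.erase xy).insert (xy.1, xy.2 + 1) v
          else d) d) d0

def clear_line (board : List (List (List Int))) (set_positions : List (Int × Int × List Int)) : Int :=
  let s := (PySem.List.pyRange ((board.length : Int) - 1) (-1) (-1)).foldl
    (pvStepA board) (0, 0, none, [], pvDictOf set_positions)
  let count := s.1
  let deletes := s.2.2.2.1
  let d := s.2.2.2.2
  let _ := if count > 0 then pvShiftA deletes d else d
  count

-- ===== PORT B =====
def clear_line_alt (board : List (List (List Int))) (set_positions : List (Int × Int × List Int)) : Int :=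
  (board.countP (fun line => !decide (pvBlack ∈ line)) : Int)

-- ===== PRECONDITION & SPEC =====
def Spec_clear_line (board : List (List (List Int))) (set_positions : List (Int × Int × List Int)) (out : Int) : Prop := out = clear_line_alt board set_positions
instance (board : List (List (List Int))) (set_positions : List (Int × Int × List Int)) (out : Int) : Decidable (Spec_clear_line board set_positions out) := by unfold Spec_clear_line; infer_instance

-- ===== CLAIM (what is proved, stated in full; the proofs are below) =====
def Claim_equal_clear_line : Prop := ∀ (board : List (List (List Int))) (set_positions : List (Int × Int × List Int)), Dom_clear_line board set_positions → Spec_clear_line board set_positions (clear_line board set_positions)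

-- ===== LEMMAS AND PROOFS =====

-- the count component of A's first loop counts the traversed indices whose row has no BLACK
theorem pvStepA_fst (board : List (List (List Int))) (L : List Int)
    (st : Int × Int × Option Int × List Int × PySem.Dict (Int × Int) (List Int)) :
    (L.foldl (pvStepA board) st).1
      = st.1 + (L.countP (fun i => !decide (pvBlack ∈ PySem.List.pyGetD board i [])) : Int) := by
  induction L generalizing st with
  | nil => simp
  | cons i t ih =>
    simp only [List.foldl_cons, List.countP_cons, ih]
    unfold pvStepA
    by_cases h : pvBlack ∈ PySem.List.pyGetD board i []
    · simp [h]
    · simp [h]; omega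

-- ===== VERDICT =====
theorem clear_line_spec : Claim_equal_clear_line := by
  intro board set_positions _hDom
  unfold Spec_clear_line clear_line clear_line_alt
  dsimp only
  rw [PySem.List.pyRange_neg_one_eq_reverse]
  have h1 : (-1 : Int) + 1 = 0 := by norm_num
  have h2 : (board.length : Int) - 1 + 1 = (board.length : Int) := by ring
  rw [h1, h2, pvStepA_fst]
  rw [List.countP_reverse]
  have h3 : (PySem.List.pyRange 0 (board.length : Int) 1).countP
      (fun i => !decide (pvBlack ∈ PySem.List.pyGetD board i []))
      = board.countP (fun line => !decide (pvBlack ∈ line)) := by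
    have := PySem.List.map_pyGetD_pyRange_zero' board ([] : List (List Int))
    calc (PySem.List.pyRange 0 (board.length : Int) 1).countP
          (fun i => !decide (pvBlack ∈ PySem.List.pyGetD board i []))
        = ((PySem.List.pyRange 0 (board.length : Int) 1).map
            (fun i => PySem.List.pyGetD board i [])).countP
            (fun line => !decide (pvBlack ∈ line)) := by
          rw [List.countP_map]; rfl
      _ = board.countP (fun line => !decide (pvBlack ∈ line)) := by rw [this]
  rw [h3]
  ring
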